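-- pv_equiv track=rewrite | github.com/Fitsum-Azerefegne/A2SV_Solved_Questions | 0524-longest-word-in-dictionary-through-deleting/0524-longest-word-in-dictionary-through-deleting.py | findLongestWord
-- ===== SOURCE A (Python) =====
-- from typing import List
--
-- def findLongestWord(s: str, dictionary: List[str]) -> str:
--     output = ""
--     dict_point = 0
--
--     while dict_point < len(dictionary):
--         s_pointer = 0
--         single_point = 0
--         while s_pointer < len(s) and single_point < len(dictionary[dict_point]):
--             if s[s_pointer] == dictionary[dict_point][single_point]:
--                 single_point += 1
--             s_pointer += 1
--
--         if single_point == len(dictionary[dict_point]):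
--             word = dictionary[dict_point]
--             if len(word) > len(output) or ((len(word) == len(output) and word < output)):
--                 output = word
--
--         dict_point += 1
--
--     return output
-- ===== SOURCE B (Python) =====
-- def findLongestWord(s: str, dictionary):
--     for w in sorted(dictionary, key=lambda w: (-len(w), w)):
--         it = iter(s)
--         if all(c in it for c in w):
--             return w
--     return ""
-- ===== Notes on version B (the rewrite author's own statement) =====
-- stated objective: simpler
-- what changed: Replaces A's accumulate-best scan (hand-written two-pointer index loops plus pairwise longest/lex-smallest comparisons) by sorting a copy of the dictionary with key (-len(w), w) and returning the first word that is a subsequence of s via an iterator-based check.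
import Mathlib
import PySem

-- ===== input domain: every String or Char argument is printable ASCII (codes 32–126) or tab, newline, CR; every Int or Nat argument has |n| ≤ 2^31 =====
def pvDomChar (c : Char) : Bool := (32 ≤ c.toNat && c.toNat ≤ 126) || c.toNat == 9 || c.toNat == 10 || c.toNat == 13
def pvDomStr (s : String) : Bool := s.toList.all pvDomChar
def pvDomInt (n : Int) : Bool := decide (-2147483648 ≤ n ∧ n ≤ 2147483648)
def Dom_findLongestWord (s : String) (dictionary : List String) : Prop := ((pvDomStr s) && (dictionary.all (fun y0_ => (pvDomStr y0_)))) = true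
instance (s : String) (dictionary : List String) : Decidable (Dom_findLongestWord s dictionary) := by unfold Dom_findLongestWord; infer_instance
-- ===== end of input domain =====

-- B sorts a copy of the dictionary by (-len, word) and returns the first subsequence match,
-- instead of A's accumulate-best scan with hand-written index loops; objective: simpler.

-- ===== PORT A =====
-- A's inner while loop: walk the chars of s (s_pointer), advancing single_point into w on a match.
def aCount (sc : List Char) (w : List Char) (j : Nat) : Nat :=
  match sc with
  | [] => j
  | c :: rest =>
    if h : j < w.length then
      (if c = w[j] then aCount rest w (j + 1) else aCount rest w j)
    else j

def findLongestWord (s : String) (dictionary : List String) : String :=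
  dictionary.foldl (fun output word =>
    if aCount s.toList word.toList 0 = word.toList.length then
      (if PySem.Str.len word > PySem.Str.len output ∨
          (PySem.Str.len word = PySem.Str.len output ∧ word.toList < output.toList)
       then word else output)
    else output) ""

-- ===== PORT B =====
-- B's iterator check `all(c in it for c in w)`: for each word char, consume s until it is found.
def isSub : List Char → List Char → Bool
  | [], _ => true
  | _ :: _, [] => false
  | c :: w, x :: xs => if c = x then isSub w xs else isSub (c :: w) xs

def findLongestWord_alt (s : String) (dictionary : List String) : String :=
  ((PySem.List.sorted2 dictionary (fun w => -(PySem.Str.len w)) (fun w => w.toList)).find?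
      (fun w => isSub w.toList s.toList)).getD ""

-- ===== PRECONDITION & SPEC =====
def Spec_findLongestWord (s : String) (dictionary : List String) (out : String) : Prop := out = findLongestWord_alt s dictionary
instance (s : String) (dictionary : List String) (out : String) : Decidable (Spec_findLongestWord s dictionary out) := by unfold Spec_findLongestWord; infer_instance

-- ===== CLAIM (what is proved, stated in full; the proofs are below) =====
def Claim_equal_findLongestWord : Prop := ∀ (s : String) (dictionary : List String), Dom_findLongestWord s dictionary → Spec_findLongestWord s dictionary (findLongestWord s dictionary)

-- ===== LEMMAS AND PROOFS =====

-- key realising Python's (-len(w), w) ordering, as a lexicographic linear order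
def pvKey (w : String) : Int ×ₗ List Char := toLex (-(PySem.Str.len w), w.toList)

lemma pvKey_injective : Function.Injective pvKey := by
  intro a b h
  unfold pvKey at h
  exact String.toList_injective (congrArg (fun p => (ofLex p).2) h)

lemma pvKey_lt_iff (o w : String) :
    pvKey w < pvKey o ↔
      (PySem.Str.len w > PySem.Str.len o ∨
        (PySem.Str.len w = PySem.Str.len o ∧ w.toList < o.toList)) := by
  unfold pvKey
  rw [Prod.Lex.toLex_lt_toLex]
  constructor
  · rintro (h | ⟨h1, h2⟩)
    · exact Or.inl (by omega)
    · exact Or.inr ⟨by omega, h2⟩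
  · rintro (h | ⟨h1, h2⟩)
    · exact Or.inl (by omega)
    · exact Or.inr ⟨by omega, h2⟩

-- "keep the better of output and word" as a keyed minimum
def bestK (o w : String) : String := if pvKey w < pvKey o then w else o

-- A's candidate-update comparison is exactly bestK
lemma best_eq (o w : String) :
    (if PySem.Str.len w > PySem.Str.len o ∨
        (PySem.Str.len w = PySem.Str.len o ∧ w.toList < o.toList)
     then w else o) = bestK o w := by
  unfold bestK
  exact if_congr (pvKey_lt_iff o w).symm rfl rfl

-- A's fold step, after rewriting the subsequence test and the comparison
def pvStep (s : String) (o w : String) : String :=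
  if isSub w.toList s.toList then bestK o w else o

-- greedy two-pointer count reaches len(w) iff the (greedy) iterator check succeeds
lemma aCount_eq (sc : List Char) (w : List Char) (j : Nat) (hj : j ≤ w.length) :
    (aCount sc w j = w.length) ↔ (isSub (w.drop j) sc = true) := by
  induction sc generalizing j with
  | nil =>
    simp only [aCount]
    by_cases h : j = w.length
    · subst h; simp [List.drop_length, isSub]
    · have hlt : j < w.length := lt_of_le_of_ne hj h
      rw [List.drop_eq_getElem_cons hlt]
      simp [isSub, h]
  | cons c rest ih =>
    by_cases h : j < w.length
    · rw [List.drop_eq_getElem_cons h]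
      by_cases hc : c = w[j]
      · have he : isSub (w[j] :: w.drop (j + 1)) (c :: rest) = isSub (w.drop (j + 1)) rest := by
          simp only [isSub]
          rw [if_pos hc.symm]
        rw [he]
        simp only [aCount, dif_pos h, if_pos hc]
        exact ih (j + 1) h
      · have he : isSub (w[j] :: w.drop (j + 1)) (c :: rest) = isSub (w[j] :: w.drop (j + 1)) rest := by
          simp only [isSub]
          rw [if_neg (Ne.symm hc)]
        rw [he, ← List.drop_eq_getElem_cons h]
        simp only [aCount, dif_pos h, if_neg hc]
        exact ih j hj
    · have hj' : j = w.length := le_antisymm hj (not_lt.mp h)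
      subst hj'
      simp [aCount, List.drop_length, isSub]

-- A's fold equals the fold of pvStep
lemma foldA_eq (s : String) (l : List String) (init : String) :
    l.foldl (fun output word =>
      if aCount s.toList word.toList 0 = word.toList.length then
        (if PySem.Str.len word > PySem.Str.len output ∨
            (PySem.Str.len word = PySem.Str.len output ∧ word.toList < output.toList)
         then word else output)
      else output) init = l.foldl (pvStep s) init := by
  apply PySem.List.foldl_congr_mem
  intro acc x _
  unfold pvStep
  rw [if_congr (aCount_eq s.toList x.toList 0 (Nat.zero_le _)) (best_eq acc x) rfl]
  simp

-- bestK never moves: the accumulator is already minimal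
lemma foldl_stay (s : String) (t : List String) (o : String)
    (h : ∀ v ∈ t, pvKey o ≤ pvKey v) : t.foldl (pvStep s) o = o := by
  induction t with
  | nil => rfl
  | cons v t ih =>
    have hv : pvStep s o v = o := by
      unfold pvStep bestK
      rw [if_neg (not_lt.mpr (h v (List.mem_cons_self)))]
      simp
    simp only [List.foldl_cons, hv]
    exact ih (fun v hv => h v (List.mem_cons_of_mem _ hv))

lemma bestK_empty (w : String) : bestK "" w = w := by
  by_cases hw : w = ""
  · subst hw
    unfold bestK
    rw [if_neg (lt_irrefl _)]
  · unfold bestK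
    rw [if_pos]
    rw [pvKey_lt_iff]
    left
    have h0 : PySem.Str.len "" = 0 := by decide
    have hlen := PySem.Str.len_eq w
    have hne : w.toList ≠ [] := fun h => hw (String.toList_injective (by simpa using h))
    have : 0 < w.toList.length := List.length_pos_iff.mpr hne
    omega

-- on a key-sorted list, the best-accumulating fold returns the first match
lemma fold_sorted_eq_find (s : String) (l : List String)
    (h : l.Pairwise (fun a b => pvKey a ≤ pvKey b)) :
    l.foldl (pvStep s) "" = (l.find? (fun w => isSub w.toList s.toList)).getD "" := by
  induction l with
  | nil => rfl
  | cons w t ih =>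
    rcases List.pairwise_cons.mp h with ⟨hw, ht⟩
    by_cases hc : isSub w.toList s.toList
    · have h1 : pvStep s "" w = w := by
        unfold pvStep
        rw [if_pos hc, bestK_empty]
      rw [List.foldl_cons, h1, List.find?_cons_of_pos (by simpa using hc)]
      simpa using foldl_stay s t w hw
    · have h1 : pvStep s "" w = "" := by
        unfold pvStep
        rw [if_neg hc]
      rw [List.foldl_cons, h1, List.find?_cons_of_neg (by simpa using hc)]
      exact ih ht

-- pvStep commutes (keyed minimum with an injective key)
lemma bestK_comm (o a b : String) : bestK (bestK o a) b = bestK (bestK o b) a := by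
  unfold bestK
  rcases lt_trichotomy (pvKey a) (pvKey b) with hab | hab | hab
  · by_cases hao : pvKey a < pvKey o
    · rw [if_pos hao, if_neg (asymm hab)]
      by_cases hbo : pvKey b < pvKey o
      · rw [if_pos hbo, if_pos hab]
      · rw [if_neg hbo, if_pos hao]
    · have hbo : ¬ pvKey b < pvKey o := fun hlt => hao (lt_trans hab hlt)
      simp only [if_neg hao, if_neg hbo]
  · have hab' : a = b := pvKey_injective hab
    subst hab'
    rfl
  · by_cases hbo : pvKey b < pvKey o
    · rw [if_pos hbo, if_neg (asymm hab)]
      by_cases hao : pvKey a < pvKey o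
      · rw [if_pos hao, if_pos hab]
      · rw [if_neg hao, if_pos hbo]
    · have hao : ¬ pvKey a < pvKey o := fun hlt => hbo (lt_trans hab hlt)
      simp only [if_neg hao, if_neg hbo]

lemma pvStep_comm (s : String) (o a b : String) :
    pvStep s (pvStep s o a) b = pvStep s (pvStep s o b) a := by
  unfold pvStep
  by_cases ha : isSub a.toList s.toList <;> by_cases hb : isSub b.toList s.toList <;>
    simp [ha, hb, bestK_comm]

-- Python's sorted(dictionary, key=lambda w: (-len(w), w)) is sorting by pvKey
lemma sorted2_eq (d : List String) :
    PySem.List.sorted2 d (fun w => -(PySem.Str.len w)) (fun w => w.toList) =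
      PySem.List.sorted d pvKey := by
  rw [PySem.List.sorted_eq_foldl_insertBy]
  unfold PySem.List.sorted2
  have hfun : (fun (a b : String) =>
      (decide (-(PySem.Str.len a) < -(PySem.Str.len b)) ||
        (!decide (-(PySem.Str.len b) < -(PySem.Str.len a)) && decide (a.toList < b.toList)))) =
      (fun a b => decide (pvKey a < pvKey b)) := by
    funext a b
    have hiff : ((-(PySem.Str.len a) < -(PySem.Str.len b)) ∨
        (¬(-(PySem.Str.len b) < -(PySem.Str.len a)) ∧ a.toList < b.toList)) ↔ pvKey a < pvKey b := by
      unfold pvKey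
      rw [Prod.Lex.toLex_lt_toLex]
      constructor
      · rintro (h | ⟨h1, h2⟩)
        · exact Or.inl h
        · by_cases h3 : -(PySem.Str.len a) < -(PySem.Str.len b)
          · exact Or.inl h3
          · exact Or.inr ⟨by omega, h2⟩
      · rintro (h | ⟨h1, h2⟩)
        · exact Or.inl h
        · exact Or.inr ⟨by omega, h2⟩
    rw [← decide_eq_decide.mpr hiff]
    · simp only [Bool.decide_or, Bool.decide_and, decide_not]
    · infer_instance
  simp only [hfun]
  rfl

-- ===== VERDICT (by name: the statement is the Claim_ definition above) =====
theorem findLongestWord_spec : Claim_equal_findLongestWord := by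
  intro s d _
  unfold Spec_findLongestWord findLongestWord findLongestWord_alt
  rw [foldA_eq, sorted2_eq]
  have hperm : d.Perm (PySem.List.sorted d pvKey) := (PySem.List.sorted_perm d pvKey false).symm
  rw [List.Perm.foldl_eq' hperm (fun x _ y _ z => pvStep_comm s z x y)]
  exact fold_sorted_eq_find s _ (PySem.List.sorted_pairwise d pvKey)
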